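-- pv_equiv track=rewrite | github.com/kalash013/GCC-Patch-1.0.2 | python/Question2.py | question02
-- ===== SOURCE A (Python) =====
-- def question02(risk, bonus, trader):
--     # modify and then return the variable below
--     lis=[]
--     n=len(bonus)
--     for i in range(n):
--         lis.append([risk[i],bonus[i]])
--     lis.sort()
--     trader.sort()
--     r=-1
--     answer = 0
--     mx=0
--     for l in range(n):
--         while(r+1<n and lis[r+1][0]<=trader[l]):
--             r+=1
--             mx=max(mx,lis[r][1])
--         answer+=mx
--     return answer
-- ===== SOURCE B (Python) =====
-- def question02(risk, bonus, trader):
--     # prefix-max table over the risk-sorted pairs + binary search per trader,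
--     # with a closed-form early exit once every pair is affordable
--     n = len(bonus)
--     pairs = sorted((risk[i], bonus[i]) for i in range(n))
--     best = 0
--     prefix = []
--     for _, bn in pairs:
--         if bn > best:
--             best = bn
--         prefix.append(best)
--     trader.sort()
--     total = 0
--     for l in range(n):
--         budget = trader[l]
--         lo, hi = 0, n
--         while lo < hi:
--             mid = (lo + hi) // 2
--             if pairs[mid][0] <= budget:
--                 lo = mid + 1
--             else:
--                 hi = mid
--         if lo:
--             total += prefix[lo - 1]
--         if lo == n:
--             total += (n - 1 - l) * prefix[n - 1]
--             break
--     return total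
-- ===== Notes on version B (the rewrite author's own statement) =====
-- stated objective: alternative
-- what changed: Replaces A's coupled two-pointer sweep (running pointer and running max carried across the sorted traders) with a precomputed prefix-max table over the risk-sorted pairs plus an independent binary search per trader, exiting in closed form once every pair is affordable; both sort trader in place, and Pre_ excludes only inputs where A raises IndexError.
import Mathlib
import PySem

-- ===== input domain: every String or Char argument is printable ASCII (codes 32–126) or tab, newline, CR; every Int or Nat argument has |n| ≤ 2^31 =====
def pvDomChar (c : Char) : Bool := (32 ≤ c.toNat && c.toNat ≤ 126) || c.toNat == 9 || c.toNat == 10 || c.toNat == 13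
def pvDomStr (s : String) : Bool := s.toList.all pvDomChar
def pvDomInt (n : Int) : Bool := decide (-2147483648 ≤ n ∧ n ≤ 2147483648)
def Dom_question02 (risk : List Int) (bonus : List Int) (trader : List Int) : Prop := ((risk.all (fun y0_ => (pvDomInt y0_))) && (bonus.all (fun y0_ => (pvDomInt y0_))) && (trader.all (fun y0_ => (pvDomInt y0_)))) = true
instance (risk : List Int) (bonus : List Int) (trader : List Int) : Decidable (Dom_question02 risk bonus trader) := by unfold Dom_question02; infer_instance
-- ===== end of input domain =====

-- B replaces A's coupled two-pointer sweep with a prefix-max table over the risk-sorted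
-- pairs plus a binary search per trader, exiting in closed form once every pair is
-- affordable (alternative algorithm, same cost); like A it sorts `trader` in place in
-- Python — the equivalence proved here is about the return value.


-- ===== PORT A =====
-- the inner `while(r+1<n and lis[r+1][0]<=trader[l]): r+=1; mx=max(mx,lis[r][1])`
-- (indexing exact under Pre_: 0 ≤ r+1 < n = len(lis); trader[l] is only compared when r+1<n)
-- (fuel-bounded transcription: each pass increments r while r+1 < n, so n+1 steps of
-- fuel always outlast the Python while loop and the fuel branch is never the exit taken)
def q2whileA (lis : List (Int × Int)) (n : Nat) (b : Int) : Nat → Int → Int → Int × Int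
  | 0, r, mx => (r, mx)
  | fuel + 1, r, mx =>
    if r + 1 < (n : Int) ∧ (PySem.List.pyGetD lis (r + 1) (0, 0)).1 ≤ b then
      q2whileA lis n b fuel (r + 1) (max mx (PySem.List.pyGetD lis (r + 1) (0, 0)).2)
    else (r, mx)

def question02 (risk : List Int) (bonus : List Int) (trader : List Int) : Int :=
  let n := bonus.length
  -- for i in range(n): lis.append([risk[i], bonus[i]])   (exact under Pre_: i < len(risk))
  let lis0 := (PySem.List.pyRange 0 (n : Int) 1).foldl
      (fun acc i => acc ++ [(PySem.List.pyGetD risk i 0, PySem.List.pyGetD bonus i 0)]) []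
  let lis := PySem.List.sorted2 lis0 (fun p => p.1) (fun p => p.2)   -- lis.sort(): list lex order
  let tr := PySem.List.sorted trader (fun x => x)                    -- trader.sort()
  -- for l in range(n): while …; answer += mx   (state (r, answer, mx); the trader[l] read
  -- is exact under Pre_ whenever the while condition reaches it)
  let s := (PySem.List.pyRange 0 (n : Int) 1).foldl
      (fun (s : Int × Int × Int) l =>
        let w := q2whileA lis n (PySem.List.pyGetD tr l 0) (n + 1) s.1 s.2.2
        (w.1, s.2.1 + w.2, w.2)) (-1, 0, 0)
  s.2.1

-- ===== PORT B =====
-- the hand-written binary search of Source B (lo, hi stay ≥ 0, so Nat and Python's // agree)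
-- the hand-written binary search of Source B, fuel-bounded: hi - lo shrinks every pass,
-- so fuel n+1 ≥ hi - lo + 1 always outlasts the Python while loop
def q2bsB (ps : List (Int × Int)) (b : Int) : Nat → Nat → Nat → Nat
  | 0, lo, _ => lo
  | fuel + 1, lo, hi =>
    if lo < hi then
      let mid := (lo + hi) / 2
      if (PySem.List.pyGetD ps (mid : Int) (0, 0)).1 ≤ b then q2bsB ps b fuel (mid + 1) hi
      else q2bsB ps b fuel lo mid
    else lo

-- Source B's `for l in range(n): … if lo == n: …; break` — a for-loop with break, as the
-- obvious recursion on the number of remaining iterations (k), l being the current index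
def q2loopB (ps : List (Int × Int)) (pfx : List Int) (tr : List Int) (n : Nat) :
    Nat → Nat → Int → Int
  | 0, _, total => total
  | k + 1, l, total =>
    let lo := q2bsB ps (PySem.List.pyGetD tr (l : Int) 0) (n + 1) 0 n
    let total' := total + (if lo ≠ 0 then PySem.List.pyGetD pfx ((lo : Int) - 1) 0 else 0)
    if lo = n then total' + ((n : Int) - 1 - (l : Int)) * PySem.List.pyGetD pfx ((n : Int) - 1) 0
    else q2loopB ps pfx tr n k (l + 1) total'

def question02_alt (risk : List Int) (bonus : List Int) (trader : List Int) : Int :=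
  let n := bonus.length
  -- pairs = sorted((risk[i], bonus[i]) for i in range(n))
  let pairs := PySem.List.sorted2
      ((PySem.List.pyRange 0 (n : Int) 1).map
        (fun i => (PySem.List.pyGetD risk i 0, PySem.List.pyGetD bonus i 0)))
      (fun p => p.1) (fun p => p.2)
  -- best = 0; prefix = []; for _, bn in pairs: if bn > best: best = bn; prefix.append(best)
  let pf := pairs.foldl
      (fun (s : Int × List Int) p =>
        let b' := if s.1 < p.2 then p.2 else s.1
        (b', s.2 ++ [b'])) (0, [])
  let tr := PySem.List.sorted trader (fun x => x)                    -- trader.sort()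
  q2loopB pairs pf.2 tr n n 0 0

-- ===== PRECONDITION & SPEC =====
-- Pre_ excludes exactly the inputs on which A raises IndexError: bonus longer than risk,
-- or trader too short to supply a budget that A actually reads (A stops reading trader[l]
-- as soon as every pair has become affordable, i.e. when every kept risk is ≤ some trader).
def Pre_question02 (risk : List Int) (bonus : List Int) (trader : List Int) : Prop :=
  bonus.length ≤ risk.length ∧
  (bonus.length ≤ trader.length ∨
    (trader ≠ [] ∧ ∀ x ∈ risk.take bonus.length, ∃ t ∈ trader, x ≤ t))
instance (risk : List Int) (bonus : List Int) (trader : List Int) : Decidable (Pre_question02 risk bonus trader) := by unfold Pre_question02; infer_instance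

def pvWitness_question02 : List Int × List Int × List Int := ([1, 2], [5, 3], [2, 1])

def Spec_question02 (risk : List Int) (bonus : List Int) (trader : List Int) (out : Int) : Prop := out = question02_alt risk bonus trader
instance (risk : List Int) (bonus : List Int) (trader : List Int) (out : Int) : Decidable (Spec_question02 risk bonus trader out) := by unfold Spec_question02; infer_instance

-- ===== CLAIM (what is proved, stated in full; the proofs are below) =====
def Claim_equal_question02 : Prop := ∀ (risk : List Int) (bonus : List Int) (trader : List Int), Dom_question02 risk bonus trader → Pre_question02 risk bonus trader → Spec_question02 risk bonus trader (question02 risk bonus trader)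

-- ===== LEMMAS AND PROOFS =====

-- count of pairs whose risk is affordable, and the clamped running max of the
-- first k bonuses (both over the risk-sorted pair list)
def q2cnt (ps : List (Int × Int)) (b : Int) : Nat := ps.countP (fun q => decide (q.1 ≤ b))

def q2cm (ps : List (Int × Int)) (k : Nat) : Int :=
  (ps.take k).foldl (fun m p => max m p.2) 0

-- the value A adds (and B adds) at outer step l, and the sum of the remaining steps
def q2vl (ps : List (Int × Int)) (tr : List Int) (n l : Nat) : Int :=
  if l < tr.length then q2cm ps (q2cnt ps (tr.getD l 0)) else q2cm ps n

def q2sum (ps : List (Int × Int)) (tr : List Int) (n l : Nat) : Int :=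
  ((List.range' l (n - l)).map (q2vl ps tr n)).sum

lemma q2cnt_le_length (ps : List (Int × Int)) (b : Int) : q2cnt ps b ≤ ps.length :=
  List.countP_le_length

lemma q2cnt_mono (ps : List (Int × Int)) {b b' : Int} (h : b ≤ b') :
    q2cnt ps b ≤ q2cnt ps b' := by
  refine List.countP_mono_left (fun x _ hx => ?_)
  simp only [decide_eq_true_eq] at *
  omega

lemma pairwise_insertBy_le {α : Type} (key : α → Int) (before : α → α → Bool)
    (h1 : ∀ a b, before a b = true → key a ≤ key b)
    (h2 : ∀ a b, before a b = false → key b ≤ key a)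
    (x : α) : ∀ ys : List α, ys.Pairwise (fun a b => key a ≤ key b) →
    (PySem.List.insertBy before x ys).Pairwise (fun a b => key a ≤ key b) := by
  intro ys
  induction ys with
  | nil => intro _; simp [PySem.List.insertBy]
  | cons y t ih =>
    intro hp
    rw [List.pairwise_cons] at hp
    obtain ⟨hy, ht⟩ := hp
    by_cases hb : before x y = true
    · simp only [PySem.List.insertBy, hb, if_true]
      refine List.pairwise_cons.2 ⟨?_, List.pairwise_cons.2 ⟨hy, ht⟩⟩
      intro z hz
      rcases List.mem_cons.1 hz with rfl | hz
      · exact h1 _ _ hb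
      · exact le_trans (h1 _ _ hb) (hy z hz)
    · simp only [PySem.List.insertBy, hb]
      refine List.pairwise_cons.2 ⟨?_, ih ht⟩
      intro z hz
      rcases (PySem.List.mem_insertBy before x z t).1 hz with rfl | hz
      · exact h2 _ _ (by simpa using hb)
      · exact hy z hz

lemma foldl_insertBy_pairwise_le {α : Type} (key : α → Int) (before : α → α → Bool)
    (h1 : ∀ a b, before a b = true → key a ≤ key b)
    (h2 : ∀ a b, before a b = false → key b ≤ key a) :
    ∀ (xs acc : List α), acc.Pairwise (fun a b => key a ≤ key b) →
    (xs.foldl (fun acc x => PySem.List.insertBy before x acc) acc).Pairwise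
      (fun a b => key a ≤ key b) := by
  intro xs
  induction xs with
  | nil => intro acc h; simpa using h
  | cons x t ih =>
    intro acc h
    exact ih _ (pairwise_insertBy_le key before h1 h2 x acc h)

lemma sorted2_pairwise_fst (xs : List (Int × Int)) :
    (PySem.List.sorted2 xs (fun p => p.1) (fun p => p.2) false).Pairwise
      (fun a b => a.1 ≤ b.1) := by
  unfold PySem.List.sorted2
  simp only [if_neg (by simp : ¬(false = true))]
  refine foldl_insertBy_pairwise_le (fun p => p.1) _ ?_ ?_ xs [] (by simp)
  · intro a b hb
    show a.1 ≤ b.1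
    by_contra hc
    simp [show ¬(a.1 < b.1) by omega, show b.1 < a.1 by omega] at hb
  · intro a b hb
    show b.1 ≤ a.1
    by_contra hc
    simp [show a.1 < b.1 by omega] at hb

lemma fst_le_of_lt_cnt {ps : List (Int × Int)} {b : Int} {k : Nat}
    (hpair : ps.Pairwise (fun x y => x.1 ≤ y.1)) (hk : k < q2cnt ps b)
    (hl : k < ps.length) : ps[k].1 ≤ b := by
  by_contra hc
  push Not at hc
  have hmono := List.pairwise_iff_getElem.1 hpair
  have hzero : (ps.drop k).countP (fun q : Int × Int => decide (q.1 ≤ b)) = 0 := by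
    rw [List.countP_eq_zero]
    intro x hx
    rw [List.mem_iff_getElem] at hx
    obtain ⟨j, hj, rfl⟩ := hx
    rw [List.getElem_drop]
    have hlen : k + j < ps.length := by simp [List.length_drop] at hj; omega
    have : ps[k].1 ≤ ps[k + j].1 := by
      rcases Nat.lt_or_ge k (k + j) with h | h
      · exact hmono k (k + j) hl hlen h
      · have hje : j = 0 := by omega
        subst hje; exact le_refl _
    simp only [decide_eq_true_eq]
    omega
  have hsplit : q2cnt ps b
      = (ps.take k).countP (fun q : Int × Int => decide (q.1 ≤ b))
        + (ps.drop k).countP (fun q : Int × Int => decide (q.1 ≤ b)) := by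
    unfold q2cnt
    rw [← List.countP_append, List.take_append_drop]
  have htk : (ps.take k).countP (fun q : Int × Int => decide (q.1 ≤ b)) ≤ k := by
    have := List.countP_le_length (l := ps.take k) (p := fun q : Int × Int => decide (q.1 ≤ b))
    simp [List.length_take] at this
    omega
  omega

lemma lt_of_cnt_le {ps : List (Int × Int)} {b : Int} {k : Nat}
    (hpair : ps.Pairwise (fun x y => x.1 ≤ y.1)) (hk : q2cnt ps b ≤ k)
    (hl : k < ps.length) : b < ps[k].1 := by
  by_contra hc
  push Not at hc
  have hmono := List.pairwise_iff_getElem.1 hpair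
  have hall : ∀ x ∈ ps.take (k + 1), (fun q : Int × Int => decide (q.1 ≤ b)) x = true := by
    intro x hx
    rw [List.mem_iff_getElem] at hx
    obtain ⟨j, hj, rfl⟩ := hx
    have hjlen : j < ps.length := by
      have := List.length_take_le (k + 1) ps; omega
    have hjk : j ≤ k := by simp [List.length_take] at hj; omega
    rw [List.getElem_take]
    have : ps[j].1 ≤ ps[k].1 := by
      rcases Nat.lt_or_ge j k with h | h
      · exact hmono j k hjlen hl h
      · have hje : j = k := by omega
        exact hje ▸ le_refl _
    simp only [decide_eq_true_eq]
    omega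
  have h1 : (ps.take (k + 1)).countP (fun q : Int × Int => decide (q.1 ≤ b)) = k + 1 := by
    rw [List.countP_eq_length.2 hall, List.length_take]
    omega
  have h2 : (ps.take (k + 1)).countP (fun q : Int × Int => decide (q.1 ≤ b)) ≤ q2cnt ps b :=
    (List.take_sublist _ _).countP_le
  unfold q2cnt at hk h2
  omega

lemma q2whileA_spec {ps : List (Int × Int)} {n : Nat} (b : Int)
    (hpair : ps.Pairwise (fun x y => x.1 ≤ y.1)) (hlen : ps.length = n) :
    ∀ (fuel : Nat) (r mx : Int), -1 ≤ r → r + 1 ≤ (q2cnt ps b : Int) →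
    (q2cnt ps b : Int) ≤ r + 1 + fuel →
    q2whileA ps n b fuel r mx
      = ((q2cnt ps b : Int) - 1,
         ((ps.take (q2cnt ps b)).drop (r + 1).toNat).foldl (fun m p => max m p.2) mx) := by
  have hcl : q2cnt ps b ≤ n := hlen ▸ q2cnt_le_length ps b
  intro fuel
  induction fuel with
  | zero =>
    intro r mx h0 hc hf
    have heq : (q2cnt ps b : Int) = r + 1 := by omega
    show (r, mx) = _
    have hdrop : ((ps.take (q2cnt ps b)).drop (r + 1).toNat) = [] := by
      apply List.drop_of_length_le
      rw [List.length_take]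
      omega
    rw [hdrop]
    simp only [List.foldl_nil]
    simp only [Prod.mk.injEq]
    exact ⟨by omega, trivial⟩
  | succ fuel ih =>
    intro r mx h0 hc hf
    by_cases hstop : (q2cnt ps b : Int) = r + 1
    · rw [q2whileA, if_neg]
      · have hdrop : ((ps.take (q2cnt ps b)).drop (r + 1).toNat) = [] := by
          apply List.drop_of_length_le
          rw [List.length_take]
          omega
        rw [hdrop]
        simp only [List.foldl_nil]
        simp only [Prod.mk.injEq]
        exact ⟨by omega, trivial⟩
      · rintro ⟨hlt, hle⟩
        have hk : q2cnt ps b ≤ (r + 1).toNat := by omega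
        have hkl : (r + 1).toNat < ps.length := by omega
        have := lt_of_cnt_le hpair hk hkl
        rw [PySem.List.pyGetD_eq_getElem ps (0, 0) (by omega) (by omega)] at hle
        omega
    · have hlt : r + 1 < (q2cnt ps b : Int) := by omega
      have hkl : (r + 1).toNat < ps.length := by omega
      have hkc : (r + 1).toNat < q2cnt ps b := by omega
      have hle : ps[(r + 1).toNat].1 ≤ b := fst_le_of_lt_cnt hpair hkc hkl
      rw [q2whileA, if_pos ⟨by omega, by
        rw [PySem.List.pyGetD_eq_getElem ps (0, 0) (by omega) (by omega)]; exact hle⟩]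
      rw [ih (r + 1) _ (by omega) (by omega) (by omega)]
      congr 1
      have hlt2 : (r + 1).toNat < (ps.take (q2cnt ps b)).length := by
        rw [List.length_take]; omega
      rw [List.drop_eq_getElem_cons hlt2]
      have h2 : (r + 1 + 1).toNat = (r + 1).toNat + 1 := by omega
      rw [h2, List.foldl_cons]
      congr 2
      rw [List.getElem_take]
      rw [PySem.List.pyGetD_eq_getElem ps (0, 0) (by omega) (by omega)]

lemma q2bsB_spec {ps : List (Int × Int)} {n : Nat} (b : Int)
    (hpair : ps.Pairwise (fun x y => x.1 ≤ y.1)) (hlen : ps.length = n) :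
    ∀ (fuel lo hi : Nat), hi - lo ≤ fuel → lo ≤ q2cnt ps b → q2cnt ps b ≤ hi → hi ≤ n →
    q2bsB ps b fuel lo hi = q2cnt ps b := by
  intro fuel
  induction fuel with
  | zero =>
    intro lo hi hf h1 h2 h3
    show lo = _
    omega
  | succ fuel ih =>
    intro lo hi hf h1 h2 h3
    by_cases hlh : lo < hi
    · rw [q2bsB, if_pos hlh]
      have hmid2 : (lo + hi) / 2 < hi := by omega
      have hmlen : (lo + hi) / 2 < ps.length := by omega
      simp only []
      rw [PySem.List.pyGetD_natCast, List.getD_eq_getElem _ _ hmlen]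
      by_cases hcmp : ps[(lo + hi) / 2].1 ≤ b
      · rw [if_pos hcmp]
        have hmc : (lo + hi) / 2 < q2cnt ps b := by
          by_contra hge
          have := lt_of_cnt_le (b := b) hpair (by omega) hmlen
          omega
        exact ih _ _ (by omega) (by omega) h2 h3
      · rw [if_neg hcmp]
        have hmc : q2cnt ps b ≤ (lo + hi) / 2 := by
          by_contra hltc
          exact hcmp (fst_le_of_lt_cnt hpair (by omega) hmlen)
        exact ih _ _ (by omega) h1 (by omega) (by omega)
    · rw [q2bsB, if_neg hlh]
      omega

lemma q2prefix_spec : ∀ (ps : List (Int × Int)) (b0 : Int) (acc : List Int),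
    (ps.foldl (fun (s : Int × List Int) p =>
        let b' := if s.1 < p.2 then p.2 else s.1
        (b', s.2 ++ [b'])) (b0, acc)).2
      = acc ++ (List.range ps.length).map
          (fun j => (ps.take (j + 1)).foldl (fun m p => max m p.2) b0) := by
  intro ps
  induction ps with
  | nil => intro b0 acc; simp
  | cons p t ih =>
    intro b0 acc
    simp only [List.foldl_cons]
    have hb' : (if b0 < p.2 then p.2 else b0) = max b0 p.2 := by
      by_cases h : b0 < p.2
      · rw [if_pos h, max_eq_right (by omega)]
      · rw [if_neg h, max_eq_left (by omega)]
    rw [ih]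
    simp only [List.length_cons, List.range_succ_eq_map, List.map_cons, List.map_map]
    simp only [List.take_succ_cons, List.foldl_cons]
    rw [hb']
    simp [Function.comp]

lemma q2sum_stop {ps : List (Int × Int)} {tr : List Int} {n l : Nat} (h : n ≤ l) :
    q2sum ps tr n l = 0 := by
  unfold q2sum
  rw [Nat.sub_eq_zero_of_le h]
  simp

lemma q2sum_step {ps : List (Int × Int)} {tr : List Int} {n l : Nat} (h : l < n) :
    q2sum ps tr n l = q2vl ps tr n l + q2sum ps tr n (l + 1) := by
  unfold q2sum
  have hnl : n - l = (n - (l + 1)) + 1 := by omega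
  rw [hnl, List.range'_succ, List.map_cons, List.sum_cons]

lemma q2sum_const {ps : List (Int × Int)} {tr : List Int} {n : Nat} (g : Int)
    (l : Nat) (hln : l ≤ n) (hg : ∀ j, l ≤ j → j < n → q2vl ps tr n j = g) :
    q2sum ps tr n l = ((n : Int) - l) * g := by
  unfold q2sum
  rw [List.map_congr_left (g := fun _ => g) (by
    intro j hj
    rw [List.mem_range'_1] at hj
    exact hg j hj.1 (by omega))]
  rw [List.map_const', List.sum_replicate, List.length_range', nsmul_eq_mul]
  have : ((n - l : Nat) : Int) = (n : Int) - l := by omega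
  rw [this]

-- A's outer loop, from step l with running count c, computes the running sum of q2vl
lemma q2A_loop {ps : List (Int × Int)} {tr : List Int} {n : Nat}
    (hpair : ps.Pairwise (fun x y => x.1 ≤ y.1)) (hlen : ps.length = n)
    (htr : tr.Pairwise (· ≤ ·))
    (Hfull : n ≤ tr.length ∨ (1 ≤ tr.length ∧ q2cnt ps (tr.getD (tr.length - 1) 0) = n)) :
    ∀ (k l : Nat) (ans : Int) (c : Nat), n - l = k → c ≤ n →
    (l < tr.length → c ≤ q2cnt ps (tr.getD l 0)) →
    (tr.length ≤ l → l < n → c = n) →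
    ((List.range' l k).foldl
        (fun (s : Int × Int × Int) li =>
          let w := q2whileA ps n (tr.getD li 0) (n + 1) s.1 s.2.2
          (w.1, s.2.1 + w.2, w.2)) ((c : Int) - 1, ans, q2cm ps c)).2.1
      = ans + q2sum ps tr n l := by
  intro k
  induction k with
  | zero =>
    intro l ans c hk hc _ _
    rw [q2sum_stop (by omega)]
    simp
  | succ k ih =>
    intro l ans c hk hc hc1 hc2
    have hln : l < n := by omega
    rw [List.range'_succ, List.foldl_cons]
    rw [q2sum_step hln]
    by_cases hlm : l < tr.length
    · -- real budget read
      have hble := hc1 hlm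
      set b := tr.getD l 0 with hb
      have hcnb0 : q2cnt ps b ≤ n := hlen ▸ q2cnt_le_length ps b
      have hw := q2whileA_spec b hpair hlen (n + 1) ((c : Int) - 1) (q2cm ps c) (by omega)
        (by omega) (by omega)
      have hsimp : ((c : Int) - 1 + 1).toNat = c := by omega
      rw [hsimp] at hw
      have hmx : ((ps.take (q2cnt ps b)).drop c).foldl (fun m p => max m p.2) (q2cm ps c)
          = q2cm ps (q2cnt ps b) := by
        unfold q2cm
        have hsub : ps.take c = (ps.take (q2cnt ps b)).take c := by
          rw [List.take_take]
          congr 1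
          omega
        rw [hsub, ← List.foldl_append, List.take_append_drop]
      simp only [hw, hmx]
      have hcnb : q2cnt ps b ≤ n := hlen ▸ q2cnt_le_length ps b
      have hvl : q2vl ps tr n l = q2cm ps (q2cnt ps b) := by
        unfold q2vl
        rw [if_pos hlm, ← hb]
      rw [ih (l + 1) (ans + q2cm ps (q2cnt ps b)) (q2cnt ps b) (by omega) hcnb
        (by
          intro hl1
          have : b ≤ tr.getD (l + 1) 0 := by
            have := List.pairwise_iff_getElem.1 htr l (l + 1) hlm hl1 (by omega)
            rw [hb, List.getD_eq_getElem _ _ hlm, List.getD_eq_getElem _ _ hl1]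
            exact this
          exact q2cnt_mono ps this)
        (by
          intro hm1 hn1
          have hlm1 : l = tr.length - 1 := by omega
          rcases Hfull with h | ⟨_, h⟩
          · omega
          · rw [hb, hlm1]; exact h)]
      rw [hvl]
      ring_nf
    · -- lazy step: r + 1 = n, the while body never runs
      have hcn : c = n := hc2 (by omega) hln
      rw [q2whileA, if_neg (by rintro ⟨h1, _⟩; omega)]
      have hvl : q2vl ps tr n l = q2cm ps n := by
        unfold q2vl
        rw [if_neg hlm]
      rw [ih (l + 1) (ans + q2cm ps c) c (by omega) hc
        (by intro h; omega) (by intro _ _; exact hcn)]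
      rw [hvl, hcn]
      ring_nf

-- B's loop computes the same running sum
lemma q2B_loop {ps : List (Int × Int)} {tr : List Int} {n : Nat}
    (hpair : ps.Pairwise (fun x y => x.1 ≤ y.1)) (hlen : ps.length = n)
    (htr : tr.Pairwise (· ≤ ·))
    (Hfull : n ≤ tr.length ∨ (1 ≤ tr.length ∧ q2cnt ps (tr.getD (tr.length - 1) 0) = n))
    (pfx : List Int)
    (hpfx : pfx = (List.range n).map (fun j => q2cm ps (j + 1))) :
    ∀ (k l : Nat) (total : Int), n - l = k → (l < n → l < tr.length) →
    q2loopB ps pfx tr n k l total = total + q2sum ps tr n l := by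
  intro k
  induction k with
  | zero =>
    intro l total hk _
    rw [q2loopB, q2sum_stop (by omega)]
    ring
  | succ k ih =>
    intro l total hk hreach
    have hln : l < n := by omega
    have hlm := hreach hln
    rw [q2loopB, q2sum_step hln]
    set b := PySem.List.pyGetD tr (l : Int) 0 with hbdef
    have hbg : b = tr.getD l 0 := by rw [hbdef, PySem.List.pyGetD_natCast]
    have hcnb : q2cnt ps b ≤ n := hlen ▸ q2cnt_le_length ps b
    have hbs : q2bsB ps b (n + 1) 0 n = q2cnt ps b :=
      q2bsB_spec b hpair hlen (n + 1) 0 n (by omega) (Nat.zero_le _) hcnb (le_refl n)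
    have hpget : ∀ c : Nat, 1 ≤ c → c ≤ n →
        PySem.List.pyGetD pfx ((c : Int) - 1) 0 = q2cm ps c := by
      intro c h1 h2
      have hcast : ((c : Int) - 1) = ((c - 1 : Nat) : Int) := by omega
      rw [hcast, PySem.List.pyGetD_natCast, hpfx,
        List.getD_eq_getElem _ _ (by simp; omega), List.getElem_map, List.getElem_range]
      congr 1
      omega
    have hadd : (if q2bsB ps b (n + 1) 0 n ≠ 0 then
          PySem.List.pyGetD pfx ((q2bsB ps b (n + 1) 0 n : Int) - 1) 0 else 0)
        = q2cm ps (q2cnt ps b) := by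
      rw [hbs]
      by_cases h0 : q2cnt ps b = 0
      · rw [if_neg (by omega), h0]
        unfold q2cm
        simp
      · rw [if_pos h0]
        exact hpget _ (by omega) hcnb
    have hvl : q2vl ps tr n l = q2cm ps (q2cnt ps b) := by
      unfold q2vl
      rw [if_pos hlm, ← hbg]
    simp only [hadd]
    by_cases hfullc : q2bsB ps b (n + 1) 0 n = n
    · rw [if_pos hfullc]
      rw [hbs] at hfullc
      -- every later step contributes the global maximum
      have hconst : ∀ j, l + 1 ≤ j → j < n → q2vl ps tr n j = q2cm ps n := by
        intro j h1 h2
        unfold q2vl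
        by_cases hjm : j < tr.length
        · rw [if_pos hjm]
          have hble : b ≤ tr.getD j 0 := by
            have := List.pairwise_iff_getElem.1 htr l j hlm hjm (by omega)
            rw [hbg, List.getD_eq_getElem _ _ hlm, List.getD_eq_getElem _ _ hjm]
            exact this
          have := q2cnt_mono ps hble
          have hj2 : q2cnt ps (tr.getD j 0) ≤ n := hlen ▸ q2cnt_le_length ps _
          have : q2cnt ps (tr.getD j 0) = n := by omega
          rw [this]
        · rw [if_neg hjm]
      rw [q2sum_const (q2cm ps n) (l + 1) (by omega) hconst]
      rw [hvl, hfullc]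
      have hgmax : PySem.List.pyGetD pfx ((n : Int) - 1) 0 = q2cm ps n := by
        have hn1 : 1 ≤ n := by omega
        exact hpget n hn1 (le_refl n)
      rw [hgmax]
      push_cast
      ring
    · rw [if_neg hfullc]
      rw [hbs] at hfullc
      rw [ih (l + 1) _ (by omega)
        (by
          intro hn1
          by_contra hm1
          have hlm1 : l = tr.length - 1 := by omega
          rcases Hfull with h | ⟨_, h⟩
          · omega
          · rw [hbg, hlm1] at hfullc; exact hfullc h)]
      rw [hvl]
      ring

-- ===== VERDICT (by name: the statement is the Claim_ definition above) =====
theorem question02_spec : Claim_equal_question02 := by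
  intro risk bonus trader _hdom hpre
  obtain ⟨hrk, hsec⟩ := hpre
  unfold Spec_question02 question02 question02_alt
  simp only [PySem.List.foldl_append_singleton_eq_map, List.nil_append]
  set n := bonus.length with hn
  set base := (PySem.List.pyRange 0 (n : Int) 1).map
      (fun i => (PySem.List.pyGetD risk i 0, PySem.List.pyGetD bonus i 0)) with hbase
  set ps := PySem.List.sorted2 base (fun p => p.1) (fun p => p.2) with hps
  set tr := PySem.List.sorted trader (fun x => x) with htrdef
  have hbl : base.length = n := by
    rw [hbase, List.length_map, PySem.List.length_pyRange_one]
    omega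
  have hlen : ps.length = n := by
    rw [hps, (PySem.List.sorted2_perm base (fun p => p.1) (fun p => p.2) false).length_eq]
    exact hbl
  have htrperm : tr.Perm trader := PySem.List.sorted_perm trader (fun x => x) false
  have htrlen : tr.length = trader.length := htrperm.length_eq
  have htr : tr.Pairwise (· ≤ ·) := by
    simpa using PySem.List.sorted_pairwise trader (fun x => x)
  -- the Pre_ disjunction yields the loop hypothesis
  have Hfull : n ≤ tr.length ∨ (1 ≤ tr.length ∧ q2cnt ps (tr.getD (tr.length - 1) 0) = n) := by
    rcases hsec with h | ⟨hne, hall⟩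
    · left; omega
    · right
      have hm1 : 1 ≤ tr.length := by
        rw [htrlen]
        cases trader with
        | nil => exact absurd rfl hne
        | cons a t => simp
      refine ⟨hm1, ?_⟩
      set B := tr.getD (tr.length - 1) 0 with hB
      -- B is the maximum of trader
      have hmax : ∀ t ∈ trader, t ≤ B := by
        intro t ht
        have ht' : t ∈ tr := htrperm.mem_iff.2 ht
        rw [List.mem_iff_getElem] at ht'
        obtain ⟨j, hj, rfl⟩ := ht'
        rw [hB, List.getD_eq_getElem _ _ (by omega)]
        rcases Nat.lt_or_ge j (tr.length - 1) with h | h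
        · exact List.pairwise_iff_getElem.1 htr j (tr.length - 1) hj (by omega) h
        · have : j = tr.length - 1 := by omega
          subst this; exact le_refl _
      -- every pair's risk is ≤ B
      have hps_all : ∀ p ∈ ps, (fun q : Int × Int => decide (q.1 ≤ B)) p = true := by
        intro p hp
        have hpb : p ∈ base :=
          (PySem.List.sorted2_perm base (fun p => p.1) (fun p => p.2) false).mem_iff.1 hp
        rw [hbase, List.mem_map] at hpb
        obtain ⟨i, hi, rfl⟩ := hpb
        rw [PySem.List.mem_pyRange_one] at hi
        have hi1 : 0 ≤ i := hi.1
        have hi2 : i < (n : Int) := hi.2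
        have hitn : i.toNat < n := by omega
        have hrk' : i.toNat < risk.length := by omega
        have hget : PySem.List.pyGetD risk i 0 = risk[i.toNat] := by
          rw [PySem.List.pyGetD_eq_getElem risk 0 hi1 (by omega)]
        have hmem : risk[i.toNat] ∈ risk.take n := by
          rw [List.mem_take_iff_getElem]
          exact ⟨i.toNat, by omega, rfl⟩
        obtain ⟨t, htmem, hxt⟩ := hall _ hmem
        simp only [decide_eq_true_eq, hget]
        exact le_trans hxt (hmax t htmem)
      rw [← hlen]
      exact List.countP_eq_length.2 hps_all
  have hpair : ps.Pairwise (fun x y => x.1 ≤ y.1) := sorted2_pairwise_fst base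
  -- A side: rewrite the pyRange fold to a List.range' fold and apply q2A_loop
  have hA : ((PySem.List.pyRange 0 (n : Int) 1).foldl
      (fun (s : Int × Int × Int) l =>
        let w := q2whileA ps n (PySem.List.pyGetD tr l 0) (n + 1) s.1 s.2.2
        (w.1, s.2.1 + w.2, w.2)) (-1, 0, 0)).2.1 = q2sum ps tr n 0 := by
    rw [PySem.List.pyRange_one]
    simp only [sub_zero, Int.toNat_natCast, zero_add]
    rw [List.foldl_map]
    simp only [PySem.List.pyGetD_natCast]
    rw [List.range_eq_range']
    have h0 : ((0 : Nat) : Int) - 1 = -1 := by omega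
    have := q2A_loop hpair hlen htr Hfull n 0 0 0 (by omega) (by omega)
      (by intro _; exact Nat.zero_le _)
      (by
        intro hm0 hn0
        rcases Hfull with h | ⟨h, _⟩
        · omega
        · omega)
    rw [h0] at this
    have hcm0 : q2cm ps 0 = 0 := by unfold q2cm; simp
    rw [hcm0] at this
    rw [this]
    ring
  -- B side
  have hpfxeq : (ps.foldl (fun (s : Int × List Int) p =>
        let b' := if s.1 < p.2 then p.2 else s.1
        (b', s.2 ++ [b'])) (0, [])).2
      = (List.range n).map (fun j => q2cm ps (j + 1)) := by
    rw [q2prefix_spec, List.nil_append, hlen]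
    rfl
  have hB : q2loopB ps ((ps.foldl (fun (s : Int × List Int) p =>
        let b' := if s.1 < p.2 then p.2 else s.1
        (b', s.2 ++ [b'])) (0, [])).2) tr n n 0 0 = q2sum ps tr n 0 := by
    rw [q2B_loop hpair hlen htr Hfull _ hpfxeq n 0 0 (by omega)
      (by
        intro hn0
        rcases Hfull with h | ⟨h, _⟩
        · omega
        · omega)]
    ring
  rw [hA, hB]
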